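-- pv_equiv track=rewrite | github.com/simon-downes/archie | persona/skills/action-brain-memory/scripts/memory-prep.py | parse_turns
-- ===== SOURCE A (Python) =====
-- TOOL_NOISE = ("[Tool uses:", "[Tool use:", "[Subagent")
--
-- def parse_turns(transcript: list) -> list[dict]:
--     """Parse transcript items into user/assistant turn pairs.
--
--     User messages start with '>'. Consecutive non-user items are the assistant
--     response. Tool-use lines are stripped.
--     """
--     turns = []
--     current_user = None
--     current_asst = []
--
--     for item in transcript:
--         s = str(item).strip()
--         if not s:
--             continue
--
--         if s.startswith(">"):
--             if current_user is not None:
--                 turns.append(_make_turn(current_user, current_asst))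
--             current_user = s.lstrip("> ").strip()
--             current_asst = []
--         else:
--             if any(s.startswith(prefix) for prefix in TOOL_NOISE):
--                 continue
--             # Strip inline tool-use markers
--             cleaned = s
--             for prefix in TOOL_NOISE:
--                 while prefix in cleaned:
--                     start = cleaned.index(prefix)
--                     end = cleaned.find("]", start)
--                     if end == -1:
--                         break
--                     cleaned = (cleaned[:start] + cleaned[end + 1 :]).strip()
--             if cleaned:
--                 current_asst.append(cleaned)
--
--     if current_user is not None:
--         turns.append(_make_turn(current_user, current_asst))
--
--     return turns
--
-- def _make_turn(user: str, asst_parts: list[str]) -> dict: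
--     """Create a turn dict from user text and assistant response parts."""
--     asst = "\n\n".join(p for p in asst_parts if p.strip())
--     return {"user": user, "assistant": asst}
-- ===== SOURCE B (Python) =====
-- TOOL_NOISE = ("[Tool uses:", "[Tool use:", "[Subagent")
--
-- def _clean(s):
--     # literal copy of A's order-dependent inline marker stripping
--     cleaned = s
--     for prefix in TOOL_NOISE:
--         while prefix in cleaned:
--             start = cleaned.index(prefix)
--             end = cleaned.find("]", start)
--             if end == -1:
--                 break
--             cleaned = (cleaned[:start] + cleaned[end + 1:]).strip()
--     return cleaned
--
-- def _make_turn(user, asst_parts):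
--     asst = "\n\n".join(p for p in asst_parts if p.strip())
--     return {"user": user, "assistant": asst}
--
-- def _record(item):
--     """Classify one transcript item: (True, user_text), (False, asst_text) or None."""
--     s = str(item).strip()
--     if not s:
--         return None
--     if s.startswith(">"):
--         return (True, s.lstrip("> ").strip())
--     if s.startswith(TOOL_NOISE):
--         return None
--     c = _clean(s)
--     return (False, c) if c else None
--
-- def parse_turns(transcript: list) -> list[dict]:
--     """Parse transcript items into user/assistant turn pairs.
--
--     Two passes: classify items into records, then walk the records in
--     reverse, collecting assistant texts and closing a turn at each user
--     record; leftover assistant texts (before the first user) are dropped.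
--     """
--     recs = [r for r in map(_record, transcript) if r is not None]
--     turns = []
--     parts = []
--     for is_user, text in reversed(recs):
--         if is_user:
--             turns.append(_make_turn(text, parts[::-1]))
--             parts = []
--         else:
--             parts.append(text)
--     return turns[::-1]
-- ===== Notes on version B (the rewrite author's own statement) =====
-- stated objective: alternative
-- what changed: Replaces A's single stateful loop (optional current user + flush-on-next-user + final flush) by two passes: a classification pass mapping each item to a user/assistant record or None, then a reverse walk over the records that closes a turn at each user record and drops leftover pre-first-user assistant texts instead of tracking an Option state.
import Mathlib
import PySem

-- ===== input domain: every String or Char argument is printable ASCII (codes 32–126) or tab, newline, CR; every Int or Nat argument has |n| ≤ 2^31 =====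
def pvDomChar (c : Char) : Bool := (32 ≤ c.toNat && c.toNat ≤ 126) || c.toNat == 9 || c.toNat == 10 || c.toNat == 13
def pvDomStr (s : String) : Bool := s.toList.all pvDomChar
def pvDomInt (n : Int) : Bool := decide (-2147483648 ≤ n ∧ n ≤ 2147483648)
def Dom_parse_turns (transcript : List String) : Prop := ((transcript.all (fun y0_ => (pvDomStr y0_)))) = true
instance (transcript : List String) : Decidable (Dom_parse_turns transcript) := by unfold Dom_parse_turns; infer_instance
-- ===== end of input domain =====

-- B is a different decomposition of A (classify items into records, then group in a reverse walk); same cost.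

-- ===== PORT A =====
-- shared context: the TOOL_NOISE tuple, the inline cleaning loop and _make_turn (used verbatim by both Pythons)
def pvNoise : List (List Char) := ["[Tool uses:".toList, "[Tool use:".toList, "[Subagent".toList]

-- inner 'while prefix in cleaned' loop; fuel = cleaned.length + 1 is enough since each
-- iteration removes at least one character (only makes the same computation total)
def pvCleanGo (p : List Char) : Nat → List Char → List Char
  | 0, cleaned => cleaned
  | fuel + 1, cleaned =>
    if PySem.Chars.isIn p cleaned then
      let start := PySem.Chars.find cleaned p        -- cleaned.index(prefix) (present, so = find)
      let e := PySem.Chars.findFrom cleaned [']'] start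
      if e = -1 then cleaned
      else pvCleanGo p fuel
        (PySem.Chars.strip (PySem.Chars.slice cleaned none (some start) ++
                            PySem.Chars.slice cleaned (some (e + 1)) none))
    else cleaned

-- 'for prefix in TOOL_NOISE: while …'
def pvClean (s : List Char) : List Char :=
  pvNoise.foldl (fun cleaned p => pvCleanGo p (cleaned.length + 1) cleaned) s

-- _make_turn; s.lstrip("> ") below is dropWhile on the chars '>' and ' ' (exact, PySem has no lstrip-with-chars)
def pvMakeTurn (u : List Char) (parts : List (List Char)) : List (String × String) :=
  [("user", String.ofList u),
   ("assistant", String.ofList (PySem.Chars.join "\n\n".toList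
      (parts.filter (fun p => !(PySem.Chars.strip p).isEmpty))))]

-- A's loop body on state (turns, current_user, current_asst)
def pvStepA (st : List (List (String × String)) × Option (List Char) × List (List Char))
    (item : String) : List (List (String × String)) × Option (List Char) × List (List Char) :=
  let s := PySem.Chars.strip item.toList
  if s.isEmpty then st
  else if PySem.Chars.startswith s ['>'] then
    let turns := match st.2.1 with
      | some u => st.1 ++ [pvMakeTurn u st.2.2]
      | none => st.1
    (turns, some (PySem.Chars.strip (s.dropWhile (fun c => c == '>' || c == ' '))), [])
  else if pvNoise.any (fun p => PySem.Chars.startswith s p) then st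
  else
    let cleaned := pvClean s
    if cleaned.isEmpty then st
    else (st.1, st.2.1, st.2.2 ++ [cleaned])

def parse_turns (transcript : List String) : List (List (String × String)) :=
  let st := transcript.foldl pvStepA ([], none, [])
  match st.2.1 with
  | none => st.1
  | some u => st.1 ++ [pvMakeTurn u st.2.2]

-- ===== PORT B =====
-- _record: classify one item
def pvRecord (item : String) : Option (Bool × List Char) :=
  let s := PySem.Chars.strip item.toList
  if s.isEmpty then none
  else if PySem.Chars.startswith s ['>'] then
    some (true, PySem.Chars.strip (s.dropWhile (fun c => c == '>' || c == ' ')))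
  else if pvNoise.any (fun p => PySem.Chars.startswith s p) then none
  else
    let c := pvClean s
    if c.isEmpty then none else some (false, c)

-- reverse walk: close a turn at each user record, collect assistant texts otherwise
def pvStepB (st : List (List (String × String)) × List (List Char)) (r : Bool × List Char) :
    List (List (String × String)) × List (List Char) :=
  if r.1 then (st.1 ++ [pvMakeTurn r.2 st.2.reverse], [])
  else (st.1, st.2 ++ [r.2])

def parse_turns_alt (transcript : List String) : List (List (String × String)) :=
  let recs := transcript.filterMap pvRecord
  let st := recs.reverse.foldl pvStepB ([], [])
  st.1.reverse

-- ===== PRECONDITION & SPEC =====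
def Spec_parse_turns (transcript : List String) (out : List (List (String × String))) : Prop := out = parse_turns_alt transcript
instance (transcript : List String) (out : List (List (String × String))) : Decidable (Spec_parse_turns transcript out) := by unfold Spec_parse_turns; infer_instance

-- ===== CLAIM (what is proved, stated in full; the proofs are below) =====
def Claim_equal_parse_turns : Prop := ∀ (transcript : List String), Dom_parse_turns transcript → Spec_parse_turns transcript (parse_turns transcript)

-- ===== LEMMAS AND PROOFS =====

-- intermediate spec for grouping a record list into turns
def pvEmit (u : List Char) (parts : List (List Char)) : List (Bool × List Char) → List (List (String × String))
  | [] => [pvMakeTurn u parts]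
  | (true, t) :: rest => pvMakeTurn u parts :: pvEmit t [] rest
  | (false, t) :: rest => pvEmit u (parts ++ [t]) rest

def pvStart : List (Bool × List Char) → List (List (String × String))
  | [] => []
  | (true, t) :: rest => pvEmit t [] rest
  | (false, _) :: rest => pvStart rest

def pvLead (recs : List (Bool × List Char)) : List (List Char) :=
  (recs.takeWhile (fun r => !r.1)).map (·.2)

theorem pvEmit_eq (recs : List (Bool × List Char)) : ∀ u parts,
    pvEmit u parts recs = pvMakeTurn u (parts ++ pvLead recs) :: pvStart recs := by
  induction recs with
  | nil => intro u parts; simp [pvEmit, pvStart, pvLead]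
  | cons r rest ih =>
    intro u parts
    obtain ⟨b, t⟩ := r
    cases b with
    | true => simp [pvEmit, pvStart, pvLead]
    | false => simp [pvEmit, pvStart, pvLead, ih]

-- A's fold from any state produces the grouped records
theorem pvLoopA_eq (ts : List String) : ∀ (turns : List (List (String × String)))
    (cu : Option (List Char)) (ca : List (List Char)),
    (match ts.foldl pvStepA (turns, cu, ca) with
     | (t, none, _) => t
     | (t, some u, ca') => t ++ [pvMakeTurn u ca'])
    = turns ++ (match cu with
     | none => pvStart (ts.filterMap pvRecord)
     | some u => pvEmit u ca (ts.filterMap pvRecord)) := by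
  induction ts with
  | nil =>
    intro turns cu ca
    cases cu <;> simp [pvStart, pvEmit]
  | cons i ts ih =>
    intro turns cu ca
    simp only [List.foldl_cons, List.filterMap_cons]
    by_cases h1 : (PySem.Chars.strip i.toList).isEmpty
    · have hr : pvRecord i = none := by simp [pvRecord, h1]
      have hs : pvStepA (turns, cu, ca) i = (turns, cu, ca) := by simp [pvStepA, h1]
      rw [hr, hs]; exact ih turns cu ca
    · by_cases h2 : PySem.Chars.startswith (PySem.Chars.strip i.toList) ['>']
      · have hr : pvRecord i = some (true, PySem.Chars.strip
            ((PySem.Chars.strip i.toList).dropWhile (fun c => c == '>' || c == ' '))) := by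
          simp [pvRecord, h1, h2]
        rw [hr]
        cases cu with
        | none =>
          have hs : pvStepA (turns, none, ca) i = (turns, some (PySem.Chars.strip
              ((PySem.Chars.strip i.toList).dropWhile (fun c => c == '>' || c == ' '))), []) := by
            simp [pvStepA, h1, h2]
          rw [hs]
          simpa [pvStart] using ih turns _ []
        | some u =>
          have hs : pvStepA (turns, some u, ca) i = (turns ++ [pvMakeTurn u ca],
              some (PySem.Chars.strip
              ((PySem.Chars.strip i.toList).dropWhile (fun c => c == '>' || c == ' '))), []) := by
            simp [pvStepA, h1, h2]
          rw [hs]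
          simpa [pvEmit, List.append_assoc] using ih (turns ++ [pvMakeTurn u ca]) _ []
      · by_cases h3 : pvNoise.any (fun p => PySem.Chars.startswith (PySem.Chars.strip i.toList) p)
        · obtain ⟨p, hp, hsw⟩ : ∃ p ∈ pvNoise, PySem.Chars.startswith (PySem.Chars.strip i.toList) p = true := by
            simpa using h3
          have hr : pvRecord i = none := by
            simp only [pvRecord]
            rw [if_neg (by simpa using h1), if_neg (by simpa using h2), if_pos h3]
          have hs : pvStepA (turns, cu, ca) i = (turns, cu, ca) := by
            simp only [pvStepA]
            rw [if_neg (by simpa using h1), if_neg (by simpa using h2), if_pos h3]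
          rw [hr, hs]; exact ih turns cu ca
        · by_cases h4 : (pvClean (PySem.Chars.strip i.toList)).isEmpty
          · have hr : pvRecord i = none := by
              simp [pvRecord, h1, h2, h4]
            have hs : pvStepA (turns, cu, ca) i = (turns, cu, ca) := by
              simp [pvStepA, h1, h2, h4]
            rw [hr, hs]; exact ih turns cu ca
          · have hn : ¬ (∃ p ∈ pvNoise, PySem.Chars.startswith (PySem.Chars.strip i.toList) p = true) := by
              simpa using h3
            have hr : pvRecord i = some (false, pvClean (PySem.Chars.strip i.toList)) := by
              simp [pvRecord, h1, h2, h4, hn]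
            have hs : pvStepA (turns, cu, ca) i =
                (turns, cu, ca ++ [pvClean (PySem.Chars.strip i.toList)]) := by
              simp [pvStepA, h1, h2, h4, hn]
            rw [hr, hs]
            cases cu with
            | none => simpa [pvStart] using ih turns none (ca ++ [pvClean (PySem.Chars.strip i.toList)])
            | some u => simpa [pvEmit] using ih turns (some u) (ca ++ [pvClean (PySem.Chars.strip i.toList)])

-- B's reverse fold, as a foldr, produces the grouped records plus the dropped leading assistant texts
theorem pvLoopB_eq (recs : List (Bool × List Char)) :
    recs.foldr (fun r st => pvStepB st r) ([], []) = ((pvStart recs).reverse, (pvLead recs).reverse) := by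
  induction recs with
  | nil => simp [pvStart, pvLead]
  | cons r rest ih =>
    obtain ⟨b, t⟩ := r
    cases b with
    | true =>
      simp only [List.foldr_cons]
      rw [ih]
      simp [pvStepB, pvStart, pvLead, pvEmit_eq]
    | false =>
      simp only [List.foldr_cons]
      rw [ih]
      simp [pvStepB, pvStart, pvLead]

-- ===== VERDICT (by name: the statement is the Claim_ definition above) =====
theorem parse_turns_spec : Claim_equal_parse_turns := by
  intro transcript _
  unfold Spec_parse_turns parse_turns parse_turns_alt
  simp only [List.foldl_reverse]
  have hB := pvLoopB_eq (transcript.filterMap pvRecord)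
  have hA := pvLoopA_eq transcript [] none []
  simp only [List.nil_append] at hA
  rcases hfa : List.foldl pvStepA ([], none, []) transcript with ⟨t, cu, ca⟩
  rw [hfa] at hA
  cases cu <;> simp_all
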